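-- pv_equiv track=rewrite | github.com/tiagolins2/Lineage-Tracking | Lineage_tracking_scripts/frond_tracking88_test.py | generate_non_repeating_combinations
-- ===== SOURCE A (Python) =====
-- import itertools
--
-- def generate_non_repeating_combinations(x, y):
--     if x <= y:
--         set1 = list(range(0, x))
--         set2 = list(range(0, y))
--     else:
--         set1 = list(range(0, y))
--         set2 = list(range(0, x))
--     combinations = list(itertools.permutations(set2, len(set1)))
--     if x <= y:
--         return [list(zip(set1, combo)) for combo in combinations]
--     else:
--         return [list(zip(combo, set1)) for combo in combinations]
-- ===== SOURCE B (Python) =====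
-- def generate_non_repeating_combinations(x, y):
--     # Recursive injection generator instead of itertools.permutations:
--     # recurse over positions of the smaller range, keeping the still-unused
--     # larger-range values; emits pairings in the same lexicographic order.
--     fixed = list(range(0, min(x, y)))
--     pool = list(range(0, max(x, y)))
--
--     def rec(avail, k):
--         if k == 0:
--             return [[]]
--         return [[a] + tail
--                 for a in avail
--                 for tail in rec([b for b in avail if b != a], k - 1)]
--
--     perms = rec(pool, len(fixed))
--     if x <= y:
--         return [list(zip(fixed, p)) for p in perms]
--     else:
--         return [list(zip(p, fixed)) for p in perms]
-- ===== Notes on version B (the rewrite author's own statement) =====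
-- stated objective: alternative
-- what changed: Replaces itertools.permutations with an explicit recursive injection generator that recurses over the smaller range's positions while tracking the still-unused larger-range values, emitting pairings in the same lexicographic order.
import Mathlib
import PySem

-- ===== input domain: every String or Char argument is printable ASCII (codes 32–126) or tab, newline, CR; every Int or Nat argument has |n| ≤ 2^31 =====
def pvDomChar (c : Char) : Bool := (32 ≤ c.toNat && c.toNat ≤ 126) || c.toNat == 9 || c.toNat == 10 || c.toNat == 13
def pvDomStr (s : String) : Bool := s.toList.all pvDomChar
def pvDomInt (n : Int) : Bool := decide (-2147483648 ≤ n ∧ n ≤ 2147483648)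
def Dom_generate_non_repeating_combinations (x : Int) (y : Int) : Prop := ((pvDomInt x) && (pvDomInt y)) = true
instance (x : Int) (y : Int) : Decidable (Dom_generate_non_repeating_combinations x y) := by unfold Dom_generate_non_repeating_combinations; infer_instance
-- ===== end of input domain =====

-- B re-derives the pairings with a hand-written recursive injection generator instead of
-- itertools.permutations (same output, same order; objective: alternative structure, not speed).

-- ===== PORT A =====
-- itertools.permutations(pool, k) is ported via its documented equivalent:
-- all k-tuples of itertools.product(pool, repeat=k) in order, keeping those with no
-- repeated element (pool = list(range(0, m)), so indexing the pool is the identity).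
def pvProdRep (pool : List Int) : Nat → List (List Int)
  | 0 => [[]]
  | k + 1 => pool.flatMap (fun a => (pvProdRep pool k).map (a :: ·))

-- 'len(set(t)) == len(t)': no element of t repeats
def pvNodupB : List Int → Bool
  | [] => true
  | a :: t => !t.contains a && pvNodupB t

def generate_non_repeating_combinations (x : Int) (y : Int) : List (List (Int × Int)) :=
  if x ≤ y then
    let set1 := PySem.List.pyRange 0 x 1
    let set2 := PySem.List.pyRange 0 y 1
    let combinations := (pvProdRep set2 set1.length).filter pvNodupB
    combinations.map (fun combo => set1.zip combo)
  else
    let set1 := PySem.List.pyRange 0 y 1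
    let set2 := PySem.List.pyRange 0 x 1
    let combinations := (pvProdRep set2 set1.length).filter pvNodupB
    combinations.map (fun combo => combo.zip set1)

-- ===== PORT B =====
-- recursive injection generator: pick each still-available value in order, recurse on the rest
def pvPermsRec (avail : List Int) : Nat → List (List Int)
  | 0 => [[]]
  | k + 1 => avail.flatMap (fun a => (pvPermsRec (avail.filter (· != a)) k).map (a :: ·))

def generate_non_repeating_combinations_alt (x : Int) (y : Int) : List (List (Int × Int)) :=
  let fixed := PySem.List.pyRange 0 (min x y) 1
  let pool := PySem.List.pyRange 0 (max x y) 1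
  let perms := pvPermsRec pool fixed.length
  if x ≤ y then
    perms.map (fun p => fixed.zip p)
  else
    perms.map (fun p => p.zip fixed)

-- ===== PRECONDITION & SPEC =====
def Spec_generate_non_repeating_combinations (x : Int) (y : Int) (out : List (List (Int × Int))) : Prop := out = generate_non_repeating_combinations_alt x y
instance (x : Int) (y : Int) (out : List (List (Int × Int))) : Decidable (Spec_generate_non_repeating_combinations x y out) := by unfold Spec_generate_non_repeating_combinations; infer_instance

-- ===== CLAIM (what is proved, stated in full; the proofs are below) =====
def Claim_equal_generate_non_repeating_combinations : Prop := ∀ (x : Int) (y : Int), Dom_generate_non_repeating_combinations x y → Spec_generate_non_repeating_combinations x y (generate_non_repeating_combinations x y)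

-- ===== LEMMAS AND PROOFS =====

-- flatMap over a filtered list = flatMap over the whole list when f vanishes off the filter
theorem pv_flatMap_filter {α β : Type} (p : α → Bool) (f : α → List β) (l : List α)
    (h : ∀ a, p a = false → f a = []) :
    (l.filter p).flatMap f = l.flatMap f := by
  induction l with
  | nil => rfl
  | cons a l ih =>
    by_cases hp : p a = true
    · simp [hp, List.flatMap_cons, ih]
    · have hf : p a = false := by simpa using hp
      simp [hf, List.flatMap_cons, h a hf, ih]

-- tuples over pool avoiding a = tuples over pool with a removed, in the same order
theorem pv_prodRep_avoid (a : Int) (pool : List Int) (k : Nat) :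
    (pvProdRep pool k).filter (fun t => !t.contains a) = pvProdRep (pool.filter (· != a)) k := by
  induction k generalizing pool with
  | zero => simp [pvProdRep]
  | succ k ih =>
    simp only [pvProdRep, List.filter_flatMap]
    rw [← pv_flatMap_filter (· != a)
        (fun b => ((pvProdRep pool k).map (b :: ·)).filter (fun t => !t.contains a)) pool]
    · apply List.flatMap_congr
      intro b hb
      have hba : (b != a) = true := by simpa using (List.mem_filter.mp hb).2
      have hab : (a == b) = false := by
        simp only [bne_iff_ne] at hba
        simp [Ne.symm hba]
      have hba' : (b == a) = false := by simpa using hba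
      have : ((pvProdRep pool k).map (b :: ·)).filter (fun t => !t.contains a)
          = ((pvProdRep pool k).filter (fun t => !t.contains a)).map (b :: ·) := by
        rw [List.filter_map]
        congr 1
        apply List.filter_congr
        intro t _
        simp [Function.comp]
        exact fun _ => by simpa using hab
      rw [this, ih]
    · intro b hb
      have hba : b = a := by simpa [bne_iff_ne] using hb
      subst hba
      simp [List.filter_map, Function.comp]

-- main lemma: product-then-filter-distinct equals the recursive injection generator
theorem pv_prodRep_filter_eq_permsRec (k : Nat) (pool : List Int) :
    (pvProdRep pool k).filter pvNodupB = pvPermsRec pool k := by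
  induction k generalizing pool with
  | zero => simp [pvProdRep, pvPermsRec, pvNodupB]
  | succ k ih =>
    simp only [pvProdRep, pvPermsRec, List.filter_flatMap]
    apply List.flatMap_congr
    intro a _
    rw [List.filter_map]
    have hsplit : ((pvProdRep pool k).filter (pvNodupB ∘ (a :: ·)))
        = ((pvProdRep pool k).filter (fun t => !t.contains a)).filter pvNodupB := by
      rw [List.filter_filter]
      apply List.filter_congr
      intro t _
      simp [Function.comp, pvNodupB, Bool.and_comm]
    rw [hsplit, pv_prodRep_avoid, ih]

-- ===== VERDICT (by name: the statement is the Claim_ definition above) =====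
theorem generate_non_repeating_combinations_spec : Claim_equal_generate_non_repeating_combinations := by
  intro x y _
  unfold Spec_generate_non_repeating_combinations
  unfold generate_non_repeating_combinations generate_non_repeating_combinations_alt
  by_cases h : x ≤ y
  · simp only [if_pos h, min_eq_left h, max_eq_right h]
    rw [pv_prodRep_filter_eq_permsRec]
  · have h1 : min x y = y := min_eq_right (by omega)
    have h2 : max x y = x := max_eq_left (by omega)
    simp only [if_neg h, h1, h2]
    rw [pv_prodRep_filter_eq_permsRec]
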